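-- pv_equiv track=rewrite | github.com/bb1950328/DigiCod_Nspire | icth_tool.py | create_parity_matrix_from_generator
-- ===== SOURCE A (Python) =====
-- def create_parity_matrix_from_generator(generator):
--     """
--     Erstellt eine Prüfmatrix für einen zyklischen Code
--
--     Args:
--         generator (str): Generator-Polynom (Bitfolge)
--
--     Returns:
--         list: Prüfmatrix als Liste von Zeilen
--     """
--     # Generator-Polynom bereinigen
--     generator = generator.lstrip('0')
--     if not generator:
--         generator = '0'
--
--     # Anzahl der Kontrollbits = Grad des Generator-Polynoms
--     r = len(generator) - 1
--
--     # Für einen Standard-zyklischen Code ist die Codewortlänge 2^r - 1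
--     n = 2 ** r - 1
--
--     # Prüfmatrix initialisieren
--     H = []
--
--     # Bei zyklischen Codes ist jede Zeile von H eine zyklische Verschiebung der vorherigen
--     for i in range(r):
--         row = [0] * n
--
--         # Für die erste Zeile verwende das Generator-Polynom
--         if i == 0:
--             for j in range(len(generator)):
--                 if j < n:
--                     row[j] = int(generator[j])
--         else:
--             # Für nachfolgende Zeilen verwende eine zyklische Verschiebung
--             prev_row = H[i - 1]
--             # Zyklische Verschiebung nach rechts
--             row = [prev_row[-1]] + prev_row[:-1]
--
--         H.append(row)
--
--     return H
-- ===== SOURCE B (Python) =====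
-- def create_parity_matrix_from_generator(generator):
--     """Same result as A, but each row is computed directly from the single base row
--     via modular indexing, instead of chaining cyclic shifts of the previous row."""
--     g = generator.lstrip('0') or '0'
--     r = len(g) - 1
--     n = 2 ** r - 1
--     first = [0] * n
--     for j, c in enumerate(g):
--         if j < n:
--             first[j] = int(c)
--     return [[first[(k - i) % n] for k in range(n)] for i in range(r)]
-- ===== Notes on version B (the rewrite author's own statement) =====
-- stated objective: alternative
-- what changed: Each parity-check row i is computed independently from the single base row by modular indexing first[(k-i) % n], replacing A's sequential chain of cyclic right-shifts of the previous row.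
import Mathlib
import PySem

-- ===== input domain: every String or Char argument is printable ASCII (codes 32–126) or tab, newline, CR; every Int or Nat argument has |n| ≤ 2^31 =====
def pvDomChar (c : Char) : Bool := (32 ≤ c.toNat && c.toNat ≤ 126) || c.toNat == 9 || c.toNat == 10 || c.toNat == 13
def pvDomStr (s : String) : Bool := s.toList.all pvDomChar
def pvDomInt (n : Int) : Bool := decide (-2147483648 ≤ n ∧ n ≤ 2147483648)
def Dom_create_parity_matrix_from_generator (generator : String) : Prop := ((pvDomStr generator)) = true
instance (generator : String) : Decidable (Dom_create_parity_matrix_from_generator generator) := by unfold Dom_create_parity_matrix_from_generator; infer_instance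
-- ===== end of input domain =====

-- B computes each row independently from the base row by modular indexing instead of
-- chaining cyclic shifts of the previous row (alternative decomposition, same cost).

-- ===== PORT A =====
-- generator.lstrip('0'): ported by hand as dropWhile of '0' (exact: lstrip with an
-- explicit char set drops exactly the leading chars from that set).
def pvLstrip0 (s : String) : List Char := s.toList.dropWhile (· == '0')

-- first row: row = [0]*n; for j in range(len(g)): if j < n: row[j] = int(g[j])
-- (int(g[j]) ported as PySem.Int.ofChars? on the one-char list; default 0 is outside Pre_)
def pvFillA (g : List Char) (n : Nat) : List Int :=
  (PySem.List.pyRange 0 (g.length : Int) 1).foldl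
    (fun row j =>
      if j < (n : Int) then
        PySem.List.pySetD row j ((PySem.Int.ofChars? [PySem.List.pyGetD g j ' ']).getD 0)
      else row)
    (List.replicate n (0 : Int))

-- for i in range(r): row = first (i==0) or cyclic right shift of H[i-1]; H.append(row)
def pvLoopA (first : List Int) (r : Nat) : List (List Int) :=
  (PySem.List.pyRange 0 (r : Int) 1).foldl
    (fun H i =>
      let row :=
        if i == 0 then first
        else
          let prev := PySem.List.pyGetD H (i - 1) []
          PySem.List.pyGetD prev (-1) 0 :: PySem.List.slice prev none (some (-1))
      H ++ [row])
    []

def create_parity_matrix_from_generator (generator : String) : List (List Int) :=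
  let g0 := pvLstrip0 generator
  let g := if g0 = [] then ['0'] else g0
  let r : Nat := g.length - 1
  let n : Nat := 2 ^ r - 1
  pvLoopA (pvFillA g n) r

-- ===== PORT B =====
def create_parity_matrix_from_generator_alt (generator : String) : List (List Int) :=
  let g0 := pvLstrip0 generator
  let g := if g0 = [] then ['0'] else g0
  let r : Nat := g.length - 1
  let n : Nat := 2 ^ r - 1
  -- first = [0]*n; for j, c in enumerate(g): if j < n: first[j] = int(c)
  let first :=
    (PySem.List.enumerate g 0).foldl
      (fun first jc =>
        if jc.1 < (n : Int) then
          PySem.List.pySetD first jc.1 ((PySem.Int.ofChars? [jc.2]).getD 0)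
        else first)
      (List.replicate n (0 : Int))
  -- [[first[(k - i) % n] for k in range(n)] for i in range(r)]
  (PySem.List.pyRange 0 (r : Int) 1).map (fun i =>
    (PySem.List.pyRange 0 (n : Int) 1).map (fun k =>
      PySem.List.pyGetD first (PySem.Int.mod (k - i) (n : Int)) 0))

-- ===== PRECONDITION & SPEC =====
-- Pre_ excludes exactly the inputs on which Python A raises ValueError: a non-digit
-- character of the 0-stripped generator at an index below n = 2^(len-1)-1 reaches int().
def Pre_create_parity_matrix_from_generator (generator : String) : Prop :=
  ∀ j < min (if pvLstrip0 generator = [] then ['0'] else pvLstrip0 generator).length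
            (2 ^ ((if pvLstrip0 generator = [] then ['0'] else pvLstrip0 generator).length - 1) - 1),
    ((if pvLstrip0 generator = [] then ['0'] else pvLstrip0 generator).getD j ' ').isDigit
instance (generator : String) : Decidable (Pre_create_parity_matrix_from_generator generator) := by
  unfold Pre_create_parity_matrix_from_generator; infer_instance

def pvWitness_create_parity_matrix_from_generator : String := "1011"

def Spec_create_parity_matrix_from_generator (generator : String) (out : List (List Int)) : Prop := out = create_parity_matrix_from_generator_alt generator
instance (generator : String) (out : List (List Int)) : Decidable (Spec_create_parity_matrix_from_generator generator out) := by unfold Spec_create_parity_matrix_from_generator; infer_instance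

-- ===== CLAIM (what is proved, stated in full; the proofs are below) =====
def Claim_equal_create_parity_matrix_from_generator : Prop := ∀ (generator : String), Dom_create_parity_matrix_from_generator generator → Pre_create_parity_matrix_from_generator generator → Spec_create_parity_matrix_from_generator generator (create_parity_matrix_from_generator generator)

-- ===== LEMMAS AND PROOFS =====

-- B's inner row comprehension, as a named abbreviation for the proofs
def pvRowB (first : List Int) (n : Nat) (i : Int) : List Int :=
  (PySem.List.pyRange 0 (n : Int) 1).map (fun k =>
    PySem.List.pyGetD first (PySem.Int.mod (k - i) (n : Int)) 0)

lemma pvFill_eq (g : List Char) (n : Nat) :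
    (PySem.List.enumerate g 0).foldl
      (fun first jc =>
        if jc.1 < (n : Int) then
          PySem.List.pySetD first jc.1 ((PySem.Int.ofChars? [jc.2]).getD 0)
        else first)
      (List.replicate n (0 : Int)) = pvFillA g n := by
  rw [PySem.List.enumerate_eq_map_pyRange g ' ', List.foldl_map]
  rfl

lemma pvFoldSet_length {α : Type} (f : Int → α) (n : Nat) (js : List Int) (l : List α) :
    (js.foldl (fun row j => if j < (n : Int) then PySem.List.pySetD row j (f j) else row) l).length
      = l.length := by
  induction js generalizing l with
  | nil => rfl
  | cons j js ih =>
      rw [List.foldl_cons, ih]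
      split <;> simp [PySem.List.length_pySetD]

lemma pvFill_length (g : List Char) (n : Nat) : (pvFillA g n).length = n := by
  unfold pvFillA
  rw [pvFoldSet_length (fun j => ((PySem.Int.ofChars? [PySem.List.pyGetD g j ' ']).getD 0))]
  simp

lemma pvRowB_zero (first : List Int) (n : Nat) (h : first.length = n) :
    pvRowB first n 0 = first := by
  subst h
  unfold pvRowB
  conv_rhs => rw [← PySem.List.map_pyGetD_pyRange_zero' first 0]
  apply List.map_congr_left
  intro k hk
  rw [PySem.List.mem_pyRange_one] at hk
  rw [sub_zero, PySem.Int.mod_eq_emod_of_pos (by omega), Int.emod_eq_of_lt hk.1 hk.2]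

lemma pvRowB_succ (first : List Int) (n : Nat) (hn : 1 ≤ n) (i : Int) :
    PySem.List.pyGetD (pvRowB first n i) (-1) 0 ::
      PySem.List.slice (pvRowB first n i) none (some (-1)) = pvRowB first n (i + 1) := by
  unfold pvRowB
  have hsplit : PySem.List.pyRange 0 (n : Int) 1
      = PySem.List.pyRange 0 ((n : Int) - 1) 1 ++ [(n : Int) - 1] := by
    have h1 : (n : Int) = ((n : Int) - 1) + 1 := by ring
    conv_lhs => rw [h1]
    exact PySem.List.pyRange_one_succ_right (by omega)
  conv_lhs => rw [hsplit, List.map_append, List.map_singleton]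
  rw [PySem.List.pyGetD_neg_one_append_singleton, PySem.List.slice_to_neg_one,
    List.dropLast_concat]
  rw [PySem.List.pyRange_one_cons (by omega : (0 : Int) < (n : Int)), List.map_cons]
  congr 1
  · congr 1
    rw [PySem.Int.mod_eq_emod_of_pos (by omega : (0 : Int) < (n : Int)),
      PySem.Int.mod_eq_emod_of_pos (by omega : (0 : Int) < (n : Int))]
    have h2 : (n : Int) - 1 - i = (0 - (i + 1)) + 1 * (n : Int) := by ring
    rw [h2, Int.add_mul_emod_self_right]
  · rw [show (0 : Int) + 1 = 1 by norm_num, PySem.List.pyRange_one 0, PySem.List.pyRange_one 1,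
      List.map_map, List.map_map]
    have h3 : ((n : Int) - 1 - 0).toNat = ((n : Int) - 1).toNat := by norm_num
    rw [h3]
    apply List.map_congr_left
    intro k _
    simp only [Function.comp_apply]
    have h4 : (0 : Int) + (k : Int) - i = 1 + (k : Int) - (i + 1) := by ring
    rw [h4]

lemma pvLoopA_eq (first : List Int) (n : Nat) (hn : 1 ≤ n) (hlen : first.length = n) (r : Nat) :
    pvLoopA first r = (PySem.List.pyRange 0 (r : Int) 1).map (pvRowB first n) := by
  induction r with
  | zero =>
      rw [pvLoopA, PySem.List.pyRange_one_eq_nil (by norm_num)]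
      rfl
  | succ m ih =>
      unfold pvLoopA at ih ⊢
      have hcast : ((m + 1 : Nat) : Int) = (m : Int) + 1 := by push_cast; ring
      rw [hcast, PySem.List.pyRange_one_succ_right (by positivity), List.foldl_append,
        List.map_append, ih, List.foldl_cons, List.foldl_nil, List.map_singleton]
      dsimp only
      cases m with
      | zero =>
          rw [if_pos (by norm_num)]
          rw [Nat.cast_zero, pvRowB_zero first n hlen]
      | succ m' =>
          rw [if_neg (by simp; omega)]
          have hidx : ((m' + 1 : Nat) : Int) - 1 = ((m' : Nat) : Int) := by push_cast; ring
          rw [hidx, PySem.List.pyGetD_map_pyRange (pvRowB first n) (m' + 1) m' [] (by omega)]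
          rw [pvRowB_succ first n hn, Nat.cast_succ]

-- ===== VERDICT (by name: the statement is the Claim_ definition above) =====
theorem create_parity_matrix_from_generator_spec : Claim_equal_create_parity_matrix_from_generator := by
  intro generator _ _
  unfold Spec_create_parity_matrix_from_generator
  unfold create_parity_matrix_from_generator create_parity_matrix_from_generator_alt
  dsimp only
  rw [pvFill_eq]
  set g : List Char := if pvLstrip0 generator = [] then ['0'] else pvLstrip0 generator with hg
  rcases Nat.eq_zero_or_pos (g.length - 1) with hr | hr
  · rw [hr]; rfl
  · have hn : 1 ≤ 2 ^ (g.length - 1) - 1 := by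
      have : 2 ^ 1 ≤ 2 ^ (g.length - 1) := Nat.pow_le_pow_right (by omega) hr
      omega
    rw [pvLoopA_eq (pvFillA g (2 ^ (g.length - 1) - 1)) (2 ^ (g.length - 1) - 1) hn
        (pvFill_length _ _)]
    rfl
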